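-- pv_equiv track=rewrite | github.com/ooj324/zai2api | app/utils/tool_call_handler.py | find_last_trigger_signal_outside_think
-- ===== SOURCE A (Python) =====
-- def find_last_trigger_signal_outside_think(text: str, trigger_signal: str) -> int:
--     """查找不在 <think> 块内的最后一个触发信号位置。找不到返回 -1。"""
--     if not text or not trigger_signal:
--         return -1
--
--     i = 0
--     think_depth = 0
--     last_pos = -1
--
--     while i < len(text):
--         if text.startswith("<think>", i):
--             think_depth += 1
--             i += 7
--             continue
--
--         if text.startswith("</think>", i):
--             think_depth = max(0, think_depth - 1)
--             i += 8
--             continue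
--
--         if think_depth == 0 and text.startswith(trigger_signal, i):
--             last_pos = i
--             i += 1
--             continue
--
--         i += 1
--
--     return last_pos
-- ===== SOURCE B (Python) =====
-- def find_last_trigger_signal_outside_think(text: str, trigger_signal: str) -> int:
--     """Two-pass version: collect depth-0 intervals between think markers, then
--     scan each interval back-to-front for the last trigger occurrence."""
--     if not text or not trigger_signal:
--         return -1
--
--     n = len(text)
--     intervals = []
--     pos = 0
--     depth = 0
--     while pos < n:
--         o = text.find("<think>", pos)
--         c = text.find("</think>", pos)
--         if o == -1 and c == -1:
--             if depth == 0:
--                 intervals.append((pos, n))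
--             break
--         if c == -1 or (o != -1 and o < c):
--             if depth == 0:
--                 intervals.append((pos, o))
--             depth += 1
--             pos = o + 7
--         else:
--             if depth == 0:
--                 intervals.append((pos, c))
--             depth = max(0, depth - 1)
--             pos = c + 8
--
--     for a, b in reversed(intervals):
--         for i in range(b - 1, a - 1, -1):
--             if text.startswith(trigger_signal, i):
--                 return i
--     return -1
-- ===== Notes on version B (the rewrite author's own statement) =====
-- stated objective: faster
-- what changed: Single character-by-character scan replaced by two passes: C-level str.find locates every think marker to build depth-0 intervals, then each interval is scanned back-to-front so the search stops at the last trigger occurrence.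
import Mathlib
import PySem

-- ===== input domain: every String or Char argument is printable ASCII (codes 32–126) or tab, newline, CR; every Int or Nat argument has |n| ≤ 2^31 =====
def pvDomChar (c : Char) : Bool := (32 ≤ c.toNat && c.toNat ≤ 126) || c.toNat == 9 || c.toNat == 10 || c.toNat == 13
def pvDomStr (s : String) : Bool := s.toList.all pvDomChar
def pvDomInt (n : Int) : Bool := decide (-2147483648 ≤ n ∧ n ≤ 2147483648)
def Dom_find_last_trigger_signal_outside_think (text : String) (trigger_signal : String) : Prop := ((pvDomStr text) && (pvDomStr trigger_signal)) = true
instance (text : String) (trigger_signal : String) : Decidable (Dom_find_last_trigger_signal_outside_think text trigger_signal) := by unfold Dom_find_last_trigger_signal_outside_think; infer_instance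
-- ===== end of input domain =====

-- B replaces A's per-character scan by a find-based interval pass plus a backward
-- trigger scan per depth-0 interval (measurably faster by a constant factor; same results).

-- ===== PORT A =====
-- the A-side while loop: position i, think depth, last seen trigger position
def pvALoop (cs trig : List Char) (i : Nat) (depth : Int) (last : Int) : Int :=
  if _h : i < cs.length then
    if PySem.Chars.startswith (cs.drop i) "<think>".toList then
      pvALoop cs trig (i + 7) (depth + 1) last
    else if PySem.Chars.startswith (cs.drop i) "</think>".toList then
      pvALoop cs trig (i + 8) (max 0 (depth - 1)) last
    else if depth = 0 ∧ PySem.Chars.startswith (cs.drop i) trig then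
      pvALoop cs trig (i + 1) depth (i : Int)
    else
      pvALoop cs trig (i + 1) depth last
  else last
termination_by cs.length - i

def find_last_trigger_signal_outside_think (text : String) (trigger_signal : String) : Int :=
  if text.toList = [] ∨ trigger_signal.toList = [] then -1
  else pvALoop text.toList trigger_signal.toList 0 0 (-1)

-- ===== PORT B =====
-- first pass: maximal depth-0 intervals [a,b) between think markers
def pvIntervals (cs : List Char) (pos : Nat) (depth : Int) : List (Nat × Nat) :=
  if hp : pos < cs.length then
    let o := PySem.Chars.findFrom cs "<think>".toList (pos : Int)
    let c := PySem.Chars.findFrom cs "</think>".toList (pos : Int)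
    if hb : o = -1 ∧ c = -1 then
      if depth = 0 then [(pos, cs.length)] else []
    else if ho : c = -1 ∨ (o ≠ -1 ∧ o < c) then
      (if depth = 0 then [(pos, o.toNat)] else []) ++ pvIntervals cs (o.toNat + 7) (depth + 1)
    else
      (if depth = 0 then [(pos, c.toNat)] else []) ++ pvIntervals cs (c.toNat + 8) (max 0 (depth - 1))
  else []
termination_by cs.length - pos
decreasing_by
  · have hone : PySem.Chars.findFrom cs "<think>".toList (pos : Int) ≠ -1 := by
      rcases ho with h | h
      · intro h'; exact hb ⟨h', h⟩
      · exact h.1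
    have := (PySem.Chars.findFrom_natCast_spec cs "<think>".toList pos (by omega) hone).1
    omega
  · have hcne : PySem.Chars.findFrom cs "</think>".toList (pos : Int) ≠ -1 := by
      intro h'; exact ho (Or.inl h')
    have := (PySem.Chars.findFrom_natCast_spec cs "</think>".toList pos (by omega) hcne).1
    omega

-- second pass helper: last index i in [a, b) where trig starts at i, else -1 (backward scan)
def pvScanBack (cs trig : List Char) (a b : Nat) : Int :=
  if b ≤ a then -1
  else if PySem.Chars.startswith (cs.drop (b - 1)) trig then ((b - 1 : Nat) : Int)
  else pvScanBack cs trig a (b - 1)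
termination_by b

-- iterate the intervals in reverse, returning the first (i.e. globally last) hit
def pvSearch (cs trig : List Char) : List (Nat × Nat) → Int
  | [] => -1
  | (a, b) :: rest =>
      let r := pvSearch cs trig rest
      if r = -1 then pvScanBack cs trig a b else r

def find_last_trigger_signal_outside_think_alt (text : String) (trigger_signal : String) : Int :=
  if text.toList = [] ∨ trigger_signal.toList = [] then -1
  else pvSearch text.toList trigger_signal.toList (pvIntervals text.toList 0 0)

-- ===== PRECONDITION & SPEC =====
def Spec_find_last_trigger_signal_outside_think (text : String) (trigger_signal : String) (out : Int) : Prop := out = find_last_trigger_signal_outside_think_alt text trigger_signal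
instance (text : String) (trigger_signal : String) (out : Int) : Decidable (Spec_find_last_trigger_signal_outside_think text trigger_signal out) := by unfold Spec_find_last_trigger_signal_outside_think; infer_instance

-- ===== CLAIM (what is proved, stated in full; the proofs are below) =====
def Claim_equal_find_last_trigger_signal_outside_think : Prop := ∀ (text : String) (trigger_signal : String), Dom_find_last_trigger_signal_outside_think text trigger_signal → Spec_find_last_trigger_signal_outside_think text trigger_signal (find_last_trigger_signal_outside_think text trigger_signal)

-- ===== LEMMAS AND PROOFS =====

-- explicit unfolding equations for the recursive helpers (avoid rw-ambiguity)
theorem pvALoop_stop (cs trig : List Char) (i : Nat) (depth last : Int)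
    (h : ¬ i < cs.length) : pvALoop cs trig i depth last = last := by
  rw [pvALoop]; exact dif_neg h

theorem pvALoop_step (cs trig : List Char) (i : Nat) (depth last : Int)
    (h : i < cs.length) :
    pvALoop cs trig i depth last =
      (if PySem.Chars.startswith (cs.drop i) "<think>".toList then
        pvALoop cs trig (i + 7) (depth + 1) last
      else if PySem.Chars.startswith (cs.drop i) "</think>".toList then
        pvALoop cs trig (i + 8) (max 0 (depth - 1)) last
      else if depth = 0 ∧ PySem.Chars.startswith (cs.drop i) trig then
        pvALoop cs trig (i + 1) depth (i : Int)
      else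
        pvALoop cs trig (i + 1) depth last) := by
  rw [pvALoop]; exact dif_pos h

theorem pvScanBack_stop (cs trig : List Char) (a b : Nat) (h : b ≤ a) :
    pvScanBack cs trig a b = -1 := by
  rw [pvScanBack]; exact if_pos h

theorem pvScanBack_step (cs trig : List Char) (a b : Nat) (h : ¬ b ≤ a) :
    pvScanBack cs trig a b =
      (if PySem.Chars.startswith (cs.drop (b - 1)) trig then ((b - 1 : Nat) : Int)
       else pvScanBack cs trig a (b - 1)) := by
  rw [pvScanBack]; exact if_neg h

-- forward accumulate of A's trigger updates over a marker-free stretch [pos, m)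
def pvFwd (cs trig : List Char) (pos m : Nat) (last : Int) : Int :=
  if pos < m then
    pvFwd cs trig (pos + 1) m (if PySem.Chars.startswith (cs.drop pos) trig then (pos : Int) else last)
  else last
termination_by m - pos

theorem pvFwd_stop (cs trig : List Char) (pos m : Nat) (last : Int) (h : ¬ pos < m) :
    pvFwd cs trig pos m last = last := by
  rw [pvFwd]; exact if_neg h

theorem pvFwd_step (cs trig : List Char) (pos m : Nat) (last : Int) (h : pos < m) :
    pvFwd cs trig pos m last =
      pvFwd cs trig (pos + 1) m
        (if PySem.Chars.startswith (cs.drop pos) trig then (pos : Int) else last) := by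
  rw [pvFwd]; exact if_pos h

theorem pvFwd_succ (cs trig : List Char) (pos m : Nat) (last : Int) (h : pos ≤ m) :
    pvFwd cs trig pos (m + 1) last =
      (if PySem.Chars.startswith (cs.drop m) trig then (m : Int) else pvFwd cs trig pos m last) := by
  rcases Nat.eq_or_lt_of_le h with rfl | h'
  · rw [pvFwd_step cs trig pos (pos + 1) last (by omega),
      pvFwd_stop cs trig (pos + 1) (pos + 1) _ (by omega),
      pvFwd_stop cs trig pos pos last (by omega)]
  · rw [pvFwd_step cs trig pos (m + 1) last (by omega),
      pvFwd_succ cs trig (pos + 1) m _ (by omega),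
      pvFwd_step cs trig pos m last h']
termination_by m - pos

theorem pvFwd_eq_scan (cs trig : List Char) (pos m : Nat) (last : Int) :
    pvFwd cs trig pos m last =
      (if pvScanBack cs trig pos m = -1 then last else pvScanBack cs trig pos m) := by
  by_cases h : m ≤ pos
  · rw [pvFwd_stop cs trig pos m last (by omega), pvScanBack_stop cs trig pos m h]
    simp
  · obtain ⟨m', rfl⟩ : ∃ m', m = m' + 1 := ⟨m - 1, by omega⟩
    rw [pvFwd_succ cs trig pos m' last (by omega), pvScanBack_step cs trig pos (m' + 1) (by omega)]
    simp only [Nat.add_sub_cancel]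
    by_cases hs : PySem.Chars.startswith (cs.drop m') trig
    · rw [if_pos hs, if_pos hs, if_neg (by omega)]
    · rw [if_neg hs, if_neg hs, pvFwd_eq_scan]
termination_by m

-- a failed infix search rules out a prefix match at every later index
theorem pvNoPrefixLater (cs sub : List Char) (k j : Nat)
    (h : ¬ sub <:+: cs.drop k) (hkj : k ≤ j) : ¬ sub <+: cs.drop j := by
  intro hpre
  refine h (hpre.isInfix.trans ?_)
  have hdj : cs.drop j = (cs.drop k).drop (j - k) := by rw [List.drop_drop]; congr 1; omega
  rw [hdj]; exact (List.drop_suffix _ _).isInfix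

-- a "</think>" prefix precludes a "<think>" prefix at the same position
theorem pvCloseNotOpen (l : List Char) (h : "</think>".toList <+: l) :
    ¬ "<think>".toList <+: l := by
  have eC : ("</think>".toList : List Char) = ['<', '/', 't', 'h', 'i', 'n', 'k', '>'] := by decide
  have eO : ("<think>".toList : List Char) = ['<', 't', 'h', 'i', 'n', 'k', '>'] := by decide
  rw [eC] at h
  rw [eO]
  intro ho
  obtain ⟨t1, rfl⟩ := h
  have := (List.cons_prefix_cons.mp ho).2
  simp [List.cons_prefix_cons] at this

-- A's loop over a marker-free stretch [pos, m) just accumulates trigger matches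
theorem pvNoMark (cs trig : List Char) (pos m : Nat) (depth last : Int)
    (hm : m ≤ cs.length) (hpm : pos ≤ m)
    (hno : ∀ j, pos ≤ j → j < m →
      ¬ "<think>".toList <+: cs.drop j ∧ ¬ "</think>".toList <+: cs.drop j) :
    pvALoop cs trig pos depth last =
      pvALoop cs trig m depth (if depth = 0 then pvFwd cs trig pos m last else last) := by
  rcases Nat.eq_or_lt_of_le hpm with rfl | h'
  · rw [pvFwd_stop cs trig pos pos last (by omega)]
    split <;> rfl
  · have hj := hno pos le_rfl h'
    rw [pvALoop_step cs trig pos depth last (by omega),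
      if_neg (by simp only [PySem.Chars.startswith_iff]; exact fun hh => hj.1 hh),
      if_neg (by simp only [PySem.Chars.startswith_iff]; exact fun hh => hj.2 hh),
      pvFwd_step cs trig pos m last h']
    by_cases hd : depth = 0
    · by_cases hs : PySem.Chars.startswith (cs.drop pos) trig
      · rw [if_pos ⟨hd, hs⟩, pvNoMark cs trig (pos + 1) m depth _ hm (by omega)
          (fun j h1 h2 => hno j (by omega) h2), if_pos hd, if_pos hs, if_pos hd]
      · rw [if_neg (fun hh => hs hh.2), pvNoMark cs trig (pos + 1) m depth _ hm (by omega)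
          (fun j h1 h2 => hno j (by omega) h2), if_pos hd, if_neg hs, if_pos hd]
    · rw [if_neg (fun hh => hd hh.1), pvNoMark cs trig (pos + 1) m depth _ hm (by omega)
        (fun j h1 h2 => hno j (by omega) h2), if_neg hd, if_neg hd]
termination_by m - pos

-- the central bridge: A's loop equals B's interval search (threading `last`)
theorem pvMain (cs trig : List Char) (pos : Nat) (depth last : Int)
    (hp : pos ≤ cs.length) :
    pvALoop cs trig pos depth last =
      (if pvSearch cs trig (pvIntervals cs pos depth) = -1 then last
       else pvSearch cs trig (pvIntervals cs pos depth)) := by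
  by_cases hlt : pos < cs.length
  · rw [pvIntervals, dif_pos hlt]
    simp only []
    by_cases hb : PySem.Chars.findFrom cs "<think>".toList (pos : Int) = -1 ∧
        PySem.Chars.findFrom cs "</think>".toList (pos : Int) = -1
    · -- no marker anywhere from pos: one final stretch up to the end of the text
      have hnoO := (PySem.Chars.findFrom_natCast_eq_neg_one_iff cs "<think>".toList pos hp).mp hb.1
      have hnoC := (PySem.Chars.findFrom_natCast_eq_neg_one_iff cs "</think>".toList pos hp).mp hb.2
      rw [dif_pos hb,
        pvNoMark cs trig pos cs.length depth last le_rfl (by omega)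
          (fun j h1 _ => ⟨pvNoPrefixLater cs _ pos j hnoO h1,
                          pvNoPrefixLater cs _ pos j hnoC h1⟩),
        pvALoop_stop cs trig cs.length depth _ (by omega)]
      by_cases hd : depth = 0
      · rw [if_pos hd, if_pos hd]
        simp only [pvSearch]
        exact pvFwd_eq_scan cs trig pos cs.length last
      · rw [if_neg hd, if_neg hd]; simp [pvSearch]
    · rw [dif_neg hb]
      by_cases hopen : PySem.Chars.findFrom cs "</think>".toList (pos : Int) = -1 ∨
          (PySem.Chars.findFrom cs "<think>".toList (pos : Int) ≠ -1 ∧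
           PySem.Chars.findFrom cs "<think>".toList (pos : Int) <
             PySem.Chars.findFrom cs "</think>".toList (pos : Int))
      · -- next marker is an opening "<think>"
        have hone : PySem.Chars.findFrom cs "<think>".toList (pos : Int) ≠ -1 := by
          rcases hopen with h | h
          · intro h'; exact hb ⟨h', h⟩
          · exact h.1
        obtain ⟨hle, hpre, hmin⟩ :=
          PySem.Chars.findFrom_natCast_spec cs "<think>".toList pos hp hone
        set o := PySem.Chars.findFrom cs "<think>".toList (pos : Int) with ho
        have hlen : o.toNat + 7 ≤ cs.length := by
          have h7 := hpre.length_le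
          simp only [List.length_drop] at h7
          have : "<think>".toList.length = 7 := by decide
          omega
        have hnoC2 : ∀ j, pos ≤ j → j < o.toNat → ¬ "</think>".toList <+: cs.drop j := by
          rcases hopen with h | h
          · intro j h1 _
            exact pvNoPrefixLater cs _ pos j
              ((PySem.Chars.findFrom_natCast_eq_neg_one_iff cs _ pos hp).mp h) h1
          · have hcne : PySem.Chars.findFrom cs "</think>".toList (pos : Int) ≠ -1 := by
              have : (0 : Int) ≤ o := by omega
              omega
            obtain ⟨_, _, hmin'⟩ :=
              PySem.Chars.findFrom_natCast_spec cs "</think>".toList pos hp hcne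
            intro j h1 h2
            refine hmin' j h1 (by
              have h0 : (0 : Int) ≤ o := by omega
              have := h.2
              omega)
        rw [dif_pos hopen,
          pvNoMark cs trig pos o.toNat depth last (by omega) (by omega)
            (fun j h1 h2 => ⟨hmin j h1 h2, hnoC2 j h1 h2⟩),
          pvALoop_step cs trig o.toNat depth _ (by omega),
          if_pos (by rw [PySem.Chars.startswith_iff]; exact hpre),
          pvMain cs trig (o.toNat + 7) (depth + 1) _ (by omega)]
        by_cases hd : depth = 0
        · rw [if_pos hd, if_pos hd, pvFwd_eq_scan cs trig pos o.toNat last]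
          simp only [pvSearch, List.singleton_append]
          generalize pvSearch cs trig (pvIntervals cs (o.toNat + 7) (depth + 1)) = r
          split_ifs <;> simp_all
        · rw [if_neg hd, if_neg hd, List.nil_append]
      · -- next marker is a closing "</think>"
        have hcne : PySem.Chars.findFrom cs "</think>".toList (pos : Int) ≠ -1 := by
          intro h'; exact hopen (Or.inl h')
        obtain ⟨hle, hpre, hmin⟩ :=
          PySem.Chars.findFrom_natCast_spec cs "</think>".toList pos hp hcne
        set c := PySem.Chars.findFrom cs "</think>".toList (pos : Int) with hc
        have hlen : c.toNat + 8 ≤ cs.length := by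
          have h8 := hpre.length_le
          simp only [List.length_drop] at h8
          have : "</think>".toList.length = 8 := by decide
          omega
        have hnoO2 : ∀ j, pos ≤ j → j < c.toNat → ¬ "<think>".toList <+: cs.drop j := by
          by_cases hone : PySem.Chars.findFrom cs "<think>".toList (pos : Int) = -1
          · intro j h1 _
            exact pvNoPrefixLater cs _ pos j
              ((PySem.Chars.findFrom_natCast_eq_neg_one_iff cs _ pos hp).mp hone) h1
          · obtain ⟨hleO, _, hminO⟩ :=
              PySem.Chars.findFrom_natCast_spec cs "<think>".toList pos hp hone
            have hco : c ≤ PySem.Chars.findFrom cs "<think>".toList (pos : Int) := by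
              rcases not_or.mp hopen with ⟨_, h2⟩
              rcases not_and_or.mp h2 with h3 | h3
              · exact absurd hone (by simpa using h3)
              · omega
            intro j h1 h2
            exact hminO j h1 (by omega)
        rw [dif_neg hopen,
          pvNoMark cs trig pos c.toNat depth last (by omega) (by omega)
            (fun j h1 h2 => ⟨hnoO2 j h1 h2, hmin j h1 h2⟩),
          pvALoop_step cs trig c.toNat depth _ (by omega),
          if_neg (by
            rw [PySem.Chars.startswith_iff]
            exact fun hh => pvCloseNotOpen _ hpre hh),
          if_pos (by rw [PySem.Chars.startswith_iff]; exact hpre),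
          pvMain cs trig (c.toNat + 8) (max 0 (depth - 1)) _ (by omega)]
        by_cases hd : depth = 0
        · rw [if_pos hd, if_pos hd, pvFwd_eq_scan cs trig pos c.toNat last]
          simp only [pvSearch, List.singleton_append]
          generalize pvSearch cs trig (pvIntervals cs (c.toNat + 8) (max 0 (depth - 1))) = r
          split_ifs <;> simp_all
        · rw [if_neg hd, if_neg hd, List.nil_append]
  · rw [pvALoop_stop cs trig pos depth last hlt]
    rw [pvIntervals, dif_neg hlt]
    simp [pvSearch]
termination_by cs.length - pos
decreasing_by
  · omega
  · omega

-- ===== VERDICT (by name: the statement is the Claim_ definition above) =====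
theorem find_last_trigger_signal_outside_think_spec : Claim_equal_find_last_trigger_signal_outside_think := by
  intro text trigger_signal _
  unfold Spec_find_last_trigger_signal_outside_think
  unfold find_last_trigger_signal_outside_think find_last_trigger_signal_outside_think_alt
  by_cases h : text.toList = [] ∨ trigger_signal.toList = []
  · rw [if_pos h, if_pos h]
  · rw [if_neg h, if_neg h,
      pvMain text.toList trigger_signal.toList 0 0 (-1) (by omega)]
    split <;> omega
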